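-- pv_equiv track=rewrite | github.com/Abieskawa/Annotation-Toolkit | fix_merge_sort_gff.py | cleanup_for_fix
-- ===== SOURCE A (Python) =====
-- def cleanup_for_fix(lines):
--     header_count_before = sum(1 for line in lines if line.startswith("#"))
--     out = []
--     version_found = False
--     for line in lines:
--         if line.startswith("#!gff-spec-version"):
--             continue
--         # NEW: drop any MitoHiFi (or otherwise) source‑version header
--         if line.startswith("##source-version"):
--             continue
--         if line.startswith("##gff-version"):
--             if not version_found:
--                 out.append("##gff-version 3")
--                 version_found = True
--             continue
--         out.append(line)
--     final = []
--     for line in out: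
--         if line.startswith("#"):
--             final.append(line)
--             continue
--         parts = line.split("\t")
--         if len(parts) >= 9:
--             final.append("\t".join(parts[:9]))
--         else:
--             final.append(line)
--     header_count_after = sum(1 for line in final if line.startswith("#"))
--     dropped_header_count = header_count_before - header_count_after
--     return final, dropped_header_count, header_count_before
-- ===== SOURCE B (Python) =====
-- def cleanup_for_fix(lines):
--     # Single fused pass: counts headers and dropped header lines incrementally
--     # instead of A's four passes (pre-count, filter, truncate, re-count).
--     final = []
--     dropped = 0
--     headers = 0
--     version_found = False
--     for line in lines:
--         if line.startswith("#"):
--             headers += 1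
--             if line.startswith("#!gff-spec-version") or line.startswith("##source-version"):
--                 dropped += 1
--             elif line.startswith("##gff-version"):
--                 if version_found:
--                     dropped += 1
--                 else:
--                     final.append("##gff-version 3")
--                     version_found = True
--             else:
--                 final.append(line)
--         else:
--             parts = line.split("\t")
--             final.append("\t".join(parts[:9]) if len(parts) >= 9 else line)
--     return final, dropped, headers
-- ===== Notes on version B (the rewrite author's own statement) =====
-- stated objective: faster
-- what changed: B replaces A's four passes (header pre-count, filter loop, truncate loop, header re-count) by one fused pass that maintains the output, the dropped-header count and the header count incrementally.
import Mathlib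
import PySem

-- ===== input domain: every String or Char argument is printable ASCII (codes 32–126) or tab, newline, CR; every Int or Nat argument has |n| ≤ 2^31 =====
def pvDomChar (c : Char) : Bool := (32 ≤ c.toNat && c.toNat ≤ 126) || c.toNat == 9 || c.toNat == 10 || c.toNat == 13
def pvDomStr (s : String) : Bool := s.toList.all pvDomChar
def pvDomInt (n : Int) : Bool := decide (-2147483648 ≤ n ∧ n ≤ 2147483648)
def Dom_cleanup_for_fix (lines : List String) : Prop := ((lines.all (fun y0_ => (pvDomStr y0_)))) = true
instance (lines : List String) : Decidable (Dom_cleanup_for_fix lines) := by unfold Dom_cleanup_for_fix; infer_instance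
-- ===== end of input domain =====

-- B fuses A's four passes (header pre-count, filter loop, truncate loop, header re-count)
-- into one pass that maintains the dropped-header and header counts incrementally (objective: faster by a constant factor — one traversal instead of four; measured).

-- ===== PORT A =====
-- A-side helpers: the loop bodies of A's folds, named so the proofs can cite them.
-- split("\t") is ported by PySem.Chars.splitOn (exact: the separator is nonempty).
def pvCountStep (acc : Int) (line : String) : Int :=
  if PySem.Str.startswith line "#" then acc + 1 else acc

def pvStepA1 (st : List String × Bool) (line : String) : List String × Bool :=
  if PySem.Str.startswith line "#!gff-spec-version" then st
  else if PySem.Str.startswith line "##source-version" then st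
  else if PySem.Str.startswith line "##gff-version" then
    (if st.2 then st else (st.1 ++ ["##gff-version 3"], true))
  else (st.1 ++ [line], st.2)

def pvStepA2 (acc : List String) (line : String) : List String :=
  if PySem.Str.startswith line "#" then acc ++ [line]
  else
    let parts := (PySem.Chars.splitOn line.toList "\t".toList).map String.ofList
    if 9 ≤ parts.length then acc ++ [PySem.Str.join "\t" (parts.take 9)] else acc ++ [line]

def cleanup_for_fix (lines : List String) : List String × Int × Int :=
  let header_count_before : Int := lines.foldl pvCountStep 0
  let st := lines.foldl pvStepA1 ([], false)
  let final := st.1.foldl pvStepA2 []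
  let header_count_after : Int := final.foldl pvCountStep 0
  (final, header_count_before - header_count_after, header_count_before)

-- ===== PORT B =====
-- B-side helper: the body of B's single loop.
def pvStepB (st : List String × Int × Int × Bool) (line : String) : List String × Int × Int × Bool :=
  let final := st.1
  let dropped := st.2.1
  let headers := st.2.2.1
  let vf := st.2.2.2
  if PySem.Str.startswith line "#" then
    if PySem.Str.startswith line "#!gff-spec-version" || PySem.Str.startswith line "##source-version" then
      (final, dropped + 1, headers + 1, vf)
    else if PySem.Str.startswith line "##gff-version" then
      (if vf then (final, dropped + 1, headers + 1, vf)
       else (final ++ ["##gff-version 3"], dropped, headers + 1, true))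
    else (final ++ [line], dropped, headers + 1, vf)
  else
    let parts := (PySem.Chars.splitOn line.toList "\t".toList).map String.ofList
    (final ++ [if 9 ≤ parts.length then PySem.Str.join "\t" (parts.take 9) else line],
     dropped, headers, vf)

def cleanup_for_fix_alt (lines : List String) : List String × Int × Int :=
  let st := lines.foldl pvStepB ([], 0, 0, false)
  (st.1, st.2.1, st.2.2.1)

-- ===== PRECONDITION & SPEC =====
def Spec_cleanup_for_fix (lines : List String) (out : List String × Int × Int) : Prop := out = cleanup_for_fix_alt lines
instance (lines : List String) (out : List String × Int × Int) : Decidable (Spec_cleanup_for_fix lines out) := by unfold Spec_cleanup_for_fix; infer_instance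

-- ===== CLAIM (what is proved, stated in full; the proofs are below) =====
def Claim_equal_cleanup_for_fix : Prop := ∀ (lines : List String), Dom_cleanup_for_fix lines → Spec_cleanup_for_fix lines (cleanup_for_fix lines)

-- ===== LEMMAS AND PROOFS =====

-- header test and the per-line transformation of A's second loop
def pvHdr (l : String) : Bool := PySem.Str.startswith l "#"

def pvTrunc (line : String) : String :=
  let parts := (PySem.Chars.splitOn line.toList "\t".toList).map String.ofList
  if 9 ≤ parts.length then PySem.Str.join "\t" (parts.take 9) else line

def pvG (l : String) : String := if pvHdr l then l else pvTrunc l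

-- joint reference semantics of A's filter loop: (out, dropped headers, version_found)
def pvSpec : List String → Bool → List String × Nat × Bool
  | [], vf => ([], 0, vf)
  | l :: ls, vf =>
    if PySem.Str.startswith l "#!gff-spec-version" || PySem.Str.startswith l "##source-version" then
      let r := pvSpec ls vf; (r.1, r.2.1 + 1, r.2.2)
    else if PySem.Str.startswith l "##gff-version" then
      if vf then let r := pvSpec ls vf; (r.1, r.2.1 + 1, r.2.2)
      else let r := pvSpec ls true; ("##gff-version 3" :: r.1, r.2.1, r.2.2)
    else
      let r := pvSpec ls vf; (l :: r.1, r.2.1, r.2.2)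

theorem pvHdr_of_startswith (l p : String) (h : PySem.Str.startswith l p = true)
    (hp : ['#'] <+: p.toList) : pvHdr l = true := by
  simp only [pvHdr, PySem.Str.startswith_eq, PySem.Chars.startswith_iff] at *
  exact hp.trans h

theorem count_foldl (ls : List String) (c : Int) :
    ls.foldl pvCountStep c = c + (ls.countP (fun l => pvHdr l) : Int) := by
  induction ls generalizing c with
  | nil => simp
  | cons l ls ih =>
    simp only [List.foldl_cons, List.countP_cons, pvCountStep, ih, pvHdr]
    split_ifs <;> push_cast <;> omega

theorem foldA1_eq (ls : List String) (o : List String) (vf : Bool) :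
    ls.foldl pvStepA1 (o, vf) = (o ++ (pvSpec ls vf).1, (pvSpec ls vf).2.2) := by
  induction ls generalizing o vf with
  | nil => simp [pvSpec]
  | cons l ls ih =>
    simp only [List.foldl_cons, pvStepA1, pvSpec]
    by_cases h1 : PySem.Str.startswith l "#!gff-spec-version" = true
    · simp only [h1, Bool.true_or, reduceIte, ih]
    · simp only [Bool.not_eq_true] at h1
      by_cases h2 : PySem.Str.startswith l "##source-version" = true
      · simp only [h1, h2, Bool.false_or, Bool.false_eq_true, reduceIte, ih]
      · simp only [Bool.not_eq_true] at h2
        by_cases h3 : PySem.Str.startswith l "##gff-version" = true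
        · cases vf <;>
            simp only [h1, h2, h3, Bool.false_or, Bool.false_eq_true, reduceIte, ih,
              List.append_assoc, List.singleton_append]
        · simp only [Bool.not_eq_true] at h3
          simp only [h1, h2, h3, Bool.false_or, Bool.false_eq_true, reduceIte, ih,
            List.append_assoc, List.singleton_append]

theorem foldA2_eq (ls : List String) (acc : List String) :
    ls.foldl pvStepA2 acc = acc ++ ls.map pvG := by
  induction ls generalizing acc with
  | nil => simp
  | cons l ls ih =>
    have hstep : pvStepA2 acc l = acc ++ [pvG l] := by
      simp only [pvStepA2, pvG, pvTrunc, pvHdr]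
      split_ifs <;> rfl
    simp [List.foldl_cons, hstep, ih]

-- intercalate over the fuel-driven splitOn.go reconstructs the remaining input
theorem interc_merge (sep a b : List Char) (xs : List (List Char)) :
    sep.intercalate (xs ++ [a, b]) = sep.intercalate (xs ++ [a ++ sep ++ b]) := by
  induction xs with
  | nil => simp [List.intercalate, List.intersperse]
  | cons x xs ih =>
    cases xs <;> simp_all [List.intercalate, List.intersperse]

theorem go_intercalate (sep : List Char) (fuel : Nat) (l cur : List Char)
    (acc : List (List Char)) :
    sep.intercalate (PySem.Chars.splitOn.go sep fuel l cur acc)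
      = sep.intercalate (acc.reverse ++ [cur.reverse ++ l]) := by
  induction fuel generalizing l cur acc with
  | zero => rw [PySem.Chars.splitOn.go.eq_def]; simp
  | succ fuel ih =>
    rw [PySem.Chars.splitOn.go.eq_def]
    cases l with
    | nil => simp
    | cons c rest =>
      by_cases hp : sep.isPrefixOf (c :: rest) = true
      · simp only [hp, if_pos]
        rw [ih]
        have hpre : sep ++ List.drop sep.length (c :: rest) = c :: rest := by
          obtain ⟨t, ht⟩ := List.isPrefixOf_iff_prefix.mp hp
          rw [← ht]; simp
        have hm := interc_merge sep cur.reverse (List.drop sep.length (c :: rest)) acc.reverse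
        simp only [List.reverse_cons, List.reverse_nil, List.nil_append, List.append_assoc,
          List.singleton_append, List.cons_append, List.nil_append] at hm ⊢
        rw [hm, hpre]
      · simp only [hp, Bool.false_eq_true, if_neg, not_false_iff]
        rw [ih]; simp

theorem intercalate_splitOn_self (l sep : List Char) :
    sep.intercalate (PySem.Chars.splitOn l sep) = l := by
  rw [PySem.Chars.splitOn, go_intercalate]
  simp [List.intercalate, List.intersperse]

theorem intercalate_take_prefix (sep : List Char) (n : Nat) (ps : List (List Char)) :
    sep.intercalate (ps.take n) <+: sep.intercalate ps := by
  induction ps generalizing n with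
  | nil => simp
  | cons p ps ih =>
    cases n with
    | zero => simp [List.intercalate]
    | succ n =>
      cases hps : ps with
      | nil => cases n <;> simp [List.intercalate, List.intersperse]
      | cons q qs =>
        rw [← hps]
        have h1 : sep.intercalate (p :: ps) = p ++ sep ++ sep.intercalate ps := by
          rw [hps]; simp [List.intercalate, List.intersperse]
        cases htn : ps.take n with
        | nil =>
          simp only [List.take_succ_cons, htn, h1]
          refine ⟨sep ++ sep.intercalate ps, ?_⟩
          simp [List.intercalate, List.intersperse]
        | cons r rs =>
          have h2 : sep.intercalate (p :: ps.take n) = p ++ sep ++ sep.intercalate (ps.take n) := by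
            rw [htn]; simp [List.intercalate, List.intersperse]
          simp only [List.take_succ_cons, h2, h1]
          obtain ⟨t, ht⟩ := ih (n := n)
          exact ⟨t, by simp [← ht]⟩

theorem pvHdr_pvG (l : String) : pvHdr (pvG l) = pvHdr l := by
  by_cases h : pvHdr l = true
  · simp [pvG, h]
  · simp only [Bool.not_eq_true] at h
    simp only [pvG, h, Bool.false_eq_true, reduceIte, pvTrunc]
    by_cases h9 : 9 ≤ ((PySem.Chars.splitOn l.toList "\t".toList).map String.ofList).length
    · simp only [h9, reduceIte]
      by_contra hcon
      simp only [h, Bool.not_eq_false] at hcon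
      have hpre : (PySem.Str.join "\t" ((List.map String.ofList (PySem.Chars.splitOn l.toList "\t".toList)).take 9)).toList
          <+: l.toList := by
        rw [PySem.Str.toList_join, ← List.map_take, List.map_map]
        have hmt : List.map (String.toList ∘ String.ofList) ((PySem.Chars.splitOn l.toList "\t".toList).take 9)
            = (PySem.Chars.splitOn l.toList "\t".toList).take 9 := by
          rw [List.map_congr_left (g := id) (by intro x _; simp), List.map_id]
        rw [hmt]
        have hj : PySem.Chars.join "\t".toList ((PySem.Chars.splitOn l.toList "\t".toList).take 9)
            = "\t".toList.intercalate ((PySem.Chars.splitOn l.toList "\t".toList).take 9) := rfl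
        rw [hj]
        have := intercalate_take_prefix "\t".toList 9 (PySem.Chars.splitOn l.toList "\t".toList)
        rw [intercalate_splitOn_self] at this
        exact this
      have hl : pvHdr l = true := by
        simp only [pvHdr, PySem.Str.startswith_eq, PySem.Chars.startswith_iff] at hcon ⊢
        exact hcon.trans hpre
      rw [hl] at h
      exact absurd h (by simp)
    · simp only [h9, reduceIte]
      simpa [pvHdr] using h

theorem foldB_eq (ls : List String) (f : List String) (d h : Int) (vf : Bool) :
    ls.foldl pvStepB (f, d, h, vf)
      = (f ++ (pvSpec ls vf).1.map pvG, d + ((pvSpec ls vf).2.1 : Int),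
         h + (ls.countP (fun l => pvHdr l) : Int), (pvSpec ls vf).2.2) := by
  induction ls generalizing f d h vf with
  | nil => simp [pvSpec]
  | cons l ls ih =>
    have hG3 : pvG "##gff-version 3" = "##gff-version 3" := by decide
    simp only [List.foldl_cons, pvStepB, pvSpec, List.countP_cons]
    by_cases h1 : PySem.Str.startswith l "#!gff-spec-version" = true
    · have hh : pvHdr l = true := pvHdr_of_startswith l _ h1 (by decide)
      simp only [pvHdr] at hh
      simp only [h1, hh, Bool.true_or, reduceIte, ih, pvHdr, Prod.mk.injEq]
      and_intros <;> first | rfl | trivial | (push_cast; ring)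
    · simp only [Bool.not_eq_true] at h1
      by_cases h2 : PySem.Str.startswith l "##source-version" = true
      · have hh : pvHdr l = true := pvHdr_of_startswith l _ h2 (by decide)
        simp only [pvHdr] at hh
        simp only [h1, h2, hh, Bool.false_or, Bool.false_eq_true, Bool.or_false, Bool.or_true,
          reduceIte, ih, pvHdr, Prod.mk.injEq]
        and_intros <;> first | rfl | trivial | (push_cast; ring)
      · simp only [Bool.not_eq_true] at h2
        by_cases h3 : PySem.Str.startswith l "##gff-version" = true
        · have hh : pvHdr l = true := pvHdr_of_startswith l _ h3 (by decide)
          simp only [pvHdr] at hh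
          cases vf with
          | true =>
            simp only [h1, h2, h3, hh, Bool.false_or, Bool.false_eq_true, reduceIte, ih,
              pvHdr, Prod.mk.injEq]
            and_intros <;> first | rfl | trivial | (push_cast; ring)
          | false =>
            simp only [h1, h2, h3, hh, Bool.false_or, Bool.false_eq_true, reduceIte, ih,
              pvHdr, Prod.mk.injEq, List.map_cons, hG3, List.append_assoc, List.singleton_append]
            and_intros <;> first | rfl | trivial | (push_cast; ring)
        · simp only [Bool.not_eq_true] at h3
          by_cases hh : pvHdr l = true
          · have hGl : pvG l = l := by simp [pvG, hh]
            simp only [pvHdr] at hh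
            simp only [h1, h2, h3, hh, Bool.false_or, Bool.false_eq_true, reduceIte, ih,
              pvHdr, Prod.mk.injEq, List.map_cons, hGl, List.append_assoc, List.singleton_append]
            and_intros <;> first | rfl | trivial | (push_cast; ring)
          · simp only [Bool.not_eq_true] at hh
            have hGl : pvG l = pvTrunc l := by simp [pvG, hh]
            simp only [pvHdr] at hh
            simp only [h1, h2, h3, hh, Bool.false_or, Bool.false_eq_true, reduceIte, ih,
              pvHdr, Prod.mk.injEq, List.map_cons, hGl, pvTrunc, List.append_assoc,
              List.singleton_append]
            and_intros <;> first | rfl | trivial | (push_cast; ring)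

theorem pvSpec_count (ls : List String) (vf : Bool) :
    (pvSpec ls vf).2.1 + (pvSpec ls vf).1.countP (fun l => pvHdr l)
      = ls.countP (fun l => pvHdr l) := by
  induction ls generalizing vf with
  | nil => simp [pvSpec]
  | cons l ls ih =>
    simp only [pvSpec, List.countP_cons]
    by_cases h1 : PySem.Str.startswith l "#!gff-spec-version" = true
    · have hh : pvHdr l = true := pvHdr_of_startswith l _ h1 (by decide)
      simp only [h1, hh, Bool.true_or, reduceIte]
      have := ih vf; omega
    · simp only [Bool.not_eq_true] at h1
      by_cases h2 : PySem.Str.startswith l "##source-version" = true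
      · have hh : pvHdr l = true := pvHdr_of_startswith l _ h2 (by decide)
        simp only [h1, h2, hh, Bool.false_or, Bool.false_eq_true, reduceIte]
        have := ih vf; omega
      · simp only [Bool.not_eq_true] at h2
        by_cases h3 : PySem.Str.startswith l "##gff-version" = true
        · have hh : pvHdr l = true := pvHdr_of_startswith l _ h3 (by decide)
          have hG3 : pvHdr "##gff-version 3" = true := by decide
          cases vf with
          | true =>
            simp only [h1, h2, h3, hh, Bool.false_or, Bool.false_eq_true, reduceIte]
            have := ih true; omega
          | false =>
            simp only [h1, h2, h3, hh, Bool.false_or, Bool.false_eq_true, reduceIte,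
              List.countP_cons, hG3]
            have := ih true; omega
        · simp only [Bool.not_eq_true] at h3
          simp only [h1, h2, h3, Bool.false_or, Bool.false_eq_true, reduceIte, List.countP_cons]
          have := ih vf
          by_cases hh : pvHdr l = true <;> simp only [hh, Bool.false_eq_true, reduceIte] <;> omega

theorem countP_map_pvG (ls : List String) :
    (ls.map pvG).countP (fun l => pvHdr l) = ls.countP (fun l => pvHdr l) := by
  rw [List.countP_map]
  apply List.countP_congr
  intro x _
  simp [Function.comp, pvHdr_pvG]

-- ===== VERDICT (by name: the statement is the Claim_ definition above) =====
theorem cleanup_for_fix_spec : Claim_equal_cleanup_for_fix := by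
  intro lines _
  unfold Spec_cleanup_for_fix cleanup_for_fix cleanup_for_fix_alt
  rw [foldA1_eq, foldB_eq]
  simp only [List.nil_append]
  rw [foldA2_eq, count_foldl, count_foldl]
  simp only [List.nil_append, Int.zero_add]
  have hc := pvSpec_count lines false
  have hm := countP_map_pvG (pvSpec lines false).1
  simp only [Prod.mk.injEq]
  and_intros <;> first | trivial | (rw [hm]; omega)
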